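-- pv_equiv track=rewrite | github.com/KiranYarashi/Interview_performance_prediction | m.py | StringChallenge
-- ===== SOURCE A (Python) =====
-- def StringChallenge(str1, str2):
--     char_count = {}
--
--     # Count the occurrences of each character in str1
--     for c in str1:
--         if c.isalpha():
--             if c in char_count:
--                 char_count[c] += 1
--             else:
--                 char_count[c] = 1
--
--     # Check if str2 can be constructed from str1
--     for c in str2:
--         if c in char_count and char_count[c] > 0:
--             char_count[c] -= 1
--         else:
--             return "false"
--
--     return "true"
-- ===== SOURCE B (Python) =====
-- def StringChallenge(str1, str2):
--     letters = sorted(c for c in str1 if c.isalpha())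
--     need = sorted(str2)
--     i = 0
--     for c in need:
--         while i < len(letters) and letters[i] < c:
--             i += 1
--         if i == len(letters) or letters[i] != c:
--             return "false"
--         i += 1
--     return "true"
-- ===== Notes on version B (the rewrite author's own statement) =====
-- stated objective: alternative
-- what changed: Replaces A's character-count dict with decrementing consumption by sorting str1's letters and str2 and running a two-pointer merge scan that greedily matches sorted str2 against the sorted letters.
import Mathlib
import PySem

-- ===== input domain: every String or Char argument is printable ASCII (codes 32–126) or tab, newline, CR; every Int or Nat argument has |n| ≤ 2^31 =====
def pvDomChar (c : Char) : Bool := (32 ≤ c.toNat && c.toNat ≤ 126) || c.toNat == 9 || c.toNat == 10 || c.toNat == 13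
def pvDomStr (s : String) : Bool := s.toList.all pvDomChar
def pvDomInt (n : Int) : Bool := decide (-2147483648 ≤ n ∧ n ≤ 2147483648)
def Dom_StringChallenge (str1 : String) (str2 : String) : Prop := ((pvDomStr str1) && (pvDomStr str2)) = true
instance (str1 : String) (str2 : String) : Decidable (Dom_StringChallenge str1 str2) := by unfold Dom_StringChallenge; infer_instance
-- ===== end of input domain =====

-- B replaces A's dict build + consume-and-decrement scan by sorting both sides and a two-pointer merge scan (alternative algorithm, same results).


-- ===== PORT A =====
-- first loop of A: count the alphabetic characters of str1 into a dict
def pvBuildA (str1 : List Char) : PySem.Dict Char Int :=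
  str1.foldl (fun d c =>
    if PySem.Chars.isalpha c then
      if d.contains c then d.insert c (d.getD c 0 + 1) else d.insert c 1
    else d) PySem.Dict.empty

-- second loop of A: consume str2 from the dict, early "false" when a character is unavailable
def pvConsumeA (d : PySem.Dict Char Int) (cs : List Char) : String :=
  match cs with
  | [] => "true"
  | c :: rest =>
      if d.contains c && decide (d.getD c 0 > 0) then
        pvConsumeA (d.insert c (d.getD c 0 - 1)) rest
      else "false"

def StringChallenge (str1 : String) (str2 : String) : String :=
  pvConsumeA (pvBuildA str1.toList) str2.toList

-- ===== PORT B =====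
-- B's for-loop over sorted str2 with the index pointer into the sorted letters: consuming
-- the letters' prefix plays the role of advancing the index i; the inner 'l < c' branch is
-- the while loop skipping smaller letters, 'l = c' is the match (i += 1), otherwise "false".
def pvMergeScan : List Char → List Char → Bool
  | [], _ => true
  | _ :: _, [] => false
  | c :: cs, l :: ls =>
      if l < c then pvMergeScan (c :: cs) ls
      else if l = c then pvMergeScan cs ls
      else false
termination_by t L => t.length + L.length

def StringChallenge_alt (str1 : String) (str2 : String) : String :=
  let letters := PySem.List.sorted (str1.toList.filter (fun c => PySem.Chars.isalpha c)) (fun x => x) false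
  let need := PySem.List.sorted str2.toList (fun x => x) false
  if pvMergeScan need letters then "true" else "false"

-- ===== PRECONDITION & SPEC =====
def Spec_StringChallenge (str1 : String) (str2 : String) (out : String) : Prop := out = StringChallenge_alt str1 str2
instance (str1 : String) (str2 : String) (out : String) : Decidable (Spec_StringChallenge str1 str2 out) := by unfold Spec_StringChallenge; infer_instance

-- ===== CLAIM (what is proved, stated in full; the proofs are below) =====
def Claim_equal_StringChallenge : Prop := ∀ (str1 : String) (str2 : String), Dom_StringChallenge str1 str2 → Spec_StringChallenge str1 str2 (StringChallenge str1 str2)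

-- ===== LEMMAS AND PROOFS =====

-- the dict A builds holds exactly the counts of the alphabetic characters of str1
theorem pvBuildA_getD (l : List Char) (d : PySem.Dict Char Int) (v : Char) :
    (l.foldl (fun d c =>
      if PySem.Chars.isalpha c then
        if d.contains c then d.insert c (d.getD c 0 + 1) else d.insert c 1
      else d) d).getD v 0
    = d.getD v 0 + ((l.filter (fun c => PySem.Chars.isalpha c)).count v : Int) := by
  induction l generalizing d with
  | nil => simp
  | cons c rest ih =>
    simp only [List.foldl_cons, List.filter_cons]
    by_cases ha : PySem.Chars.isalpha c = true
    · rw [if_pos ha, if_pos ha]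
      by_cases hc : d.contains c = true
      · rw [if_pos hc, ih, PySem.Dict.getD_insert]
        by_cases hv : v = c
        · subst hv
          rw [if_pos rfl, List.count_cons_self]
          push_cast
          ring
        · rw [if_neg hv, List.count_cons_of_ne (fun h => hv h.symm)]
      · rw [if_neg hc, ih, PySem.Dict.getD_insert]
        have hc0 := PySem.Dict.getD_of_not_contains d 0 (eq_false_of_ne_true hc)
        by_cases hv : v = c
        · subst hv
          rw [if_pos rfl, hc0, List.count_cons_self]
          push_cast
          ring
        · rw [if_neg hv, List.count_cons_of_ne (fun h => hv h.symm)]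
    · rw [if_neg ha, if_neg ha, ih]

-- A's consuming scan returns "true" exactly when every character of cs is still covered by d
theorem pvConsumeA_eq (cs : List Char) (d : PySem.Dict Char Int)
    (hd : ∀ c, 0 ≤ d.getD c 0) :
    pvConsumeA d cs = (if ∀ c ∈ cs, (cs.count c : Int) ≤ d.getD c 0 then "true" else "false") := by
  induction cs generalizing d with
  | nil => simp [pvConsumeA]
  | cons c rest ih =>
    rw [pvConsumeA]
    by_cases hpos : 0 < d.getD c 0
    · have hcont : d.contains c = true := by
        by_contra h
        have := PySem.Dict.getD_of_not_contains (k := c) (d0 := (0 : Int)) d (eq_false_of_ne_true h)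
        omega
      rw [hcont]
      simp only [hpos, decide_true, Bool.true_and, if_true]
      rw [ih _ (fun x => by
        rw [PySem.Dict.getD_insert]
        by_cases hx : x = c <;> simp only [hx, if_true] <;> first | omega | exact hd x)]
      congr 1
      simp only [eq_iff_iff]
      constructor
      · intro h x hx
        by_cases hxc : x = c
        · subst hxc
          by_cases hr : x ∈ rest
          · have := h x hr
            rw [PySem.Dict.getD_insert, if_pos rfl] at this
            simp only [List.count_cons_self]
            push_cast
            omega
          · simp only [List.count_cons_self, List.count_eq_zero_of_not_mem hr]
            push_cast
            omega
        · have hxr : x ∈ rest := by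
            rcases List.mem_cons.mp hx with h' | h'
            · exact absurd h' hxc
            · exact h'
          have := h x hxr
          rw [PySem.Dict.getD_insert, if_neg hxc] at this
          rw [List.count_cons_of_ne (fun h => hxc h.symm)]
          exact this
      · intro h x hx
        rw [PySem.Dict.getD_insert]
        by_cases hxc : x = c
        · subst hxc
          rw [if_pos rfl]
          have := h x List.mem_cons_self
          rw [List.count_cons_self] at this
          push_cast at this ⊢
          omega
        · rw [if_neg hxc]
          have := h x (List.mem_cons_of_mem _ hx)
          rw [List.count_cons_of_ne (fun h => hxc h.symm)] at this
          exact this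
    · have hfail : (d.contains c && decide (d.getD c 0 > 0)) = false := by
        simp [hpos]
      rw [hfail]
      simp only [Bool.false_eq_true, if_false]
      rw [if_neg]
      intro h
      have := h c List.mem_cons_self
      rw [List.count_cons_self] at this
      have hcnt : (0 : Int) ≤ rest.count c := by positivity
      push_cast at this
      omega

-- the merge scan on two sorted lists decides exactly multiset containment
theorem pvMergeScan_iff (t L : List Char)
    (ht : t.Pairwise (· ≤ ·)) (hL : L.Pairwise (· ≤ ·)) :
    pvMergeScan t L = true ↔ ∀ c ∈ t, t.count c ≤ L.count c := by
  induction t, L using pvMergeScan.induct with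
  | case1 L => simp [pvMergeScan]
  | case2 c cs =>
    simp only [pvMergeScan, List.count_nil]
    constructor
    · intro h; exact absurd h (by simp)
    · intro h
      have := h c List.mem_cons_self
      simp [List.count_cons_self] at this
  | case3 c cs l ls hlt ih =>
    rw [pvMergeScan, if_pos hlt]
    rw [ih ht (List.Pairwise.sublist (List.sublist_cons_self l ls) hL)]
    constructor
    · intro h x hx
      have hcx : c ≤ x := by
        rcases List.mem_cons.mp hx with h' | h'
        · exact le_of_eq h'.symm
        · exact (List.pairwise_cons.mp ht).1 x h'
      have hxl : x ≠ l := fun he => absurd (he ▸ hcx) (not_le.mpr hlt)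
      rw [List.count_cons_of_ne (Ne.symm hxl)]
      exact h x hx
    · intro h x hx
      have hcx : c ≤ x := by
        rcases List.mem_cons.mp hx with h' | h'
        · exact le_of_eq h'.symm
        · exact (List.pairwise_cons.mp ht).1 x h'
      have hxl : x ≠ l := fun he => absurd (he ▸ hcx) (not_le.mpr hlt)
      have := h x hx
      rwa [List.count_cons_of_ne (Ne.symm hxl)] at this
  | case4 cs l ls hlt ih =>
    rw [pvMergeScan, if_neg hlt, if_pos rfl]
    rw [ih (List.Pairwise.sublist (List.sublist_cons_self l cs) ht)
          (List.Pairwise.sublist (List.sublist_cons_self l ls) hL)]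
    constructor
    · intro h x hx
      by_cases hxc : x = l
      · subst hxc
        by_cases hm : x ∈ cs
        · have := h x hm
          simp only [List.count_cons_self] at *
          omega
        · simp [List.count_eq_zero_of_not_mem hm]
      · have hm : x ∈ cs := by
          rcases List.mem_cons.mp hx with h' | h'
          · exact absurd h' hxc
          · exact h'
        have := h x hm
        rwa [List.count_cons_of_ne (Ne.symm hxc), List.count_cons_of_ne (Ne.symm hxc)]
    · intro h x hx
      by_cases hxc : x = l
      · subst hxc
        have := h x (List.mem_cons_self)
        simp only [List.count_cons_self] at *
        omega
      · have := h x (List.mem_cons_of_mem _ hx)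
        rwa [List.count_cons_of_ne (Ne.symm hxc), List.count_cons_of_ne (Ne.symm hxc)] at this
  | case5 c cs l ls hlt hne =>
    simp only [pvMergeScan, if_neg hlt, if_neg hne]
    constructor
    · intro h; exact absurd h (by simp)
    · intro h
      have hclt : c < l := lt_of_le_of_ne (not_lt.mp hlt) (fun he => hne he.symm)
      have hnm : c ∉ l :: ls := by
        intro hm
        rcases List.mem_cons.mp hm with h' | h'
        · exact absurd (h' ▸ hclt) (lt_irrefl l)
        · exact absurd (lt_of_lt_of_le hclt ((List.pairwise_cons.mp hL).1 c h')) (lt_irrefl c)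
      have := h c List.mem_cons_self
      rw [List.count_eq_zero_of_not_mem hnm] at this
      simp [List.count_cons_self] at this

theorem StringChallenge_spec : Claim_equal_StringChallenge := by
  intro str1 str2 _
  unfold Spec_StringChallenge StringChallenge StringChallenge_alt
  have hbuild : ∀ v, (pvBuildA str1.toList).getD v 0
      = ((str1.toList.filter (fun c => PySem.Chars.isalpha c)).count v : Int) := fun v => by
    rw [pvBuildA, pvBuildA_getD]; simp
  rw [pvConsumeA_eq _ _ (fun c => by rw [hbuild]; positivity)]
  have hpt : (PySem.List.sorted str2.toList (fun x => x) false).Pairwise (· ≤ ·) :=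
    PySem.List.sorted_pairwise _ _
  have hpL : (PySem.List.sorted (str1.toList.filter (fun c => PySem.Chars.isalpha c)) (fun x => x) false).Pairwise (· ≤ ·) :=
    PySem.List.sorted_pairwise _ _
  have hperm2 := PySem.List.sorted_perm str2.toList (fun x => x) false
  have hperm1 := PySem.List.sorted_perm (str1.toList.filter (fun c => PySem.Chars.isalpha c)) (fun x => x) false
  have hcond : pvMergeScan (PySem.List.sorted str2.toList (fun x => x) false)
        (PySem.List.sorted (str1.toList.filter (fun c => PySem.Chars.isalpha c)) (fun x => x) false) = true
      ↔ ∀ c ∈ str2.toList, (str2.toList.count c : Int) ≤ (pvBuildA str1.toList).getD c 0 := by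
    rw [pvMergeScan_iff _ _ hpt hpL]
    constructor
    · intro h c hc
      have := h c (hperm2.mem_iff.mpr hc)
      rw [hperm2.count_eq, hperm1.count_eq] at this
      rw [hbuild]
      exact_mod_cast this
    · intro h c hc
      have := h c (hperm2.mem_iff.mp hc)
      rw [hbuild] at this
      rw [hperm2.count_eq, hperm1.count_eq]
      exact_mod_cast this
  show _ = (if pvMergeScan (PySem.List.sorted str2.toList (fun x => x) false)
        (PySem.List.sorted (str1.toList.filter (fun c => PySem.Chars.isalpha c)) (fun x => x) false)
      then "true" else "false")
  by_cases hp : ∀ c ∈ str2.toList, (str2.toList.count c : Int) ≤ (pvBuildA str1.toList).getD c 0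
  · rw [if_pos hp, if_pos (hcond.mpr hp)]
  · rw [if_neg hp, if_neg (fun h => hp (hcond.mp h))]
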